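-- pv_equiv track=rewrite | github.com/joaovitorwitt/website-backend | core/utils.py | mount_response_dict
-- ===== SOURCE A (Python) =====
-- def mount_response_dict(rows: list, columns: list) -> list[dict]:
--     """
--     Simple algorithm to map a `columns` list to each row sublist
--     inside `rows` list, converting them to a dictionary.
--
--     Args:
--         rows (list): A 2D list containing the rows from the database.
--         columns (list): A list of columns.
--
--     Returns:
--         list[dict]: A list of dictionaries each containing the column and its value
--         from the row.
--
--     Usage:
--         >>> rows = [[123, 456], [789, 051]]
--         >>> columns ['abc', 'def']
--         >>> mount_response_dict(rows, columns)
--         [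
--             {
--                 'abc': 123,
--                 'def': 456
--             },
--             {
--                 'abc': 789,
--                 'def': 051
--             }
--         ]
--     """
--     ref_value = len(columns)
--
--     validate_response_dict(rows, ref_value)
--
--     result = {}
--     data = []
--
--     for row in rows:
--         for index, col in enumerate(columns):
--             result[col] = row[index]
--
--         data.append(result)
--         result = {}
--
--     return data
--
-- def validate_response_dict(lst: list, reference_value: int) -> bool:
--     """
--     Helper method to validate a section of rows inside a 2D
--     list against a `reference_value`.
--
--     Args:
--         lst (list): The list that will be validated.
--         reference_value (int): The value to be used as reference.
--
--     Raises:
--         ValueError: If one of the lists does not contain the correct number of elements.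
--
--     Returns:
--         bool: When all the validation passes.
--
--     Example:
--         >>> cols = ['abc', 'def', 'ghi']
--         >>> rows = [[1,2,3], [4,5,6], [7,8,9,0]]
--         >>> validate_response_dict(rows, len(cols))
--         ValueError: invalid length
--     """
--     for l in lst:
--         if len(l) != reference_value:
--             raise ValueError('invalid length')
--
--     return True
-- ===== SOURCE B (Python) =====
-- def mount_response_dict(rows: list, columns: list) -> list[dict]:
--     ncols = len(columns)
--     for row in rows:
--         if len(row) != ncols:
--             raise ValueError('invalid length')
--     # column-major fill: create one dict per row, then sweep column by column
--     result = [{} for _ in rows]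
--     for j, name in enumerate(columns):
--         for d, row in zip(result, rows):
--             d[name] = row[j]
--     return result
-- ===== Notes on version B (the rewrite author's own statement) =====
-- stated objective: alternative
-- what changed: B fills the output column-major (outer loop over columns, inner loop sweeping all pre-created per-row dicts) instead of A's row-major per-row dict construction; equal because each dict still receives its keys in column order. Pre_ excludes inputs where some row's length differs from len(columns), on which both programs raise ValueError.
import Mathlib
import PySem

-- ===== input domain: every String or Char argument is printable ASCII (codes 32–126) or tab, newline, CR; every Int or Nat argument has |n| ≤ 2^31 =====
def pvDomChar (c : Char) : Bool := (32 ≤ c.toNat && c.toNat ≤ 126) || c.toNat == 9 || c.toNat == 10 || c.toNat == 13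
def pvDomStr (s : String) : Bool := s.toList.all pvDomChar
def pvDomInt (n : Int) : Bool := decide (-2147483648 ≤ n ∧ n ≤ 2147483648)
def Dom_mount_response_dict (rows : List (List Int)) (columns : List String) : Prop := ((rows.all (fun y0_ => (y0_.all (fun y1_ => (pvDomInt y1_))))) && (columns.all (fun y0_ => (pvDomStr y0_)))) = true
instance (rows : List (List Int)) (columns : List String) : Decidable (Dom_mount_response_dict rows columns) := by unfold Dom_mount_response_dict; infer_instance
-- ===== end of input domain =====

-- B fills the output column-major (outer loop over columns, sweeping all per-row dicts)
-- instead of A's row-major per-row construction; same return value wherever A returns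
-- (Pre_ excludes exactly the inputs where both raise ValueError).

-- ===== PORT A =====
-- A: validate all row lengths first (raises outside Pre_), then for each row fill a dict
-- column by column via enumerate(columns) and row[index], appending each dict to data.
def mount_response_dict (rows : List (List Int)) (columns : List String) : List (List (String × Int)) :=
  rows.foldl
    (fun data row =>
      data ++ [((PySem.List.enumerate columns 0).foldl
        (fun (result : PySem.Dict String Int) p =>
          result.insert p.2 (PySem.List.pyGetD row p.1 0)) PySem.Dict.empty).items])
    []

-- ===== PORT B =====
-- B: length check raises outside Pre_; then one empty dict per row, and an outer loop over
-- enumerate(columns) updating every dict (zipped with its row) with that column's value.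
def mount_response_dict_alt (rows : List (List Int)) (columns : List String) : List (List (String × Int)) :=
  ((PySem.List.enumerate columns 0).foldl
    (fun (result : List (PySem.Dict String Int)) p =>
      (result.zip rows).map (fun dr => (dr.1.insert p.2 (PySem.List.pyGetD dr.2 p.1 0), dr.2) |>.1))
    (rows.map (fun _ => PySem.Dict.empty))).map (fun d => d.items)

-- ===== PRECONDITION & SPEC =====
-- Pre_ excludes exactly the inputs where A (and B) raise ValueError('invalid length'):
-- some row whose length differs from len(columns).
def Pre_mount_response_dict (rows : List (List Int)) (columns : List String) : Prop :=
  ∀ r ∈ rows, r.length = columns.length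
instance (rows : List (List Int)) (columns : List String) : Decidable (Pre_mount_response_dict rows columns) := by unfold Pre_mount_response_dict; infer_instance
def pvWitness_mount_response_dict : List (List Int) × List String := ([[1, 2], [3, 4]], ["a", "b"])

def Spec_mount_response_dict (rows : List (List Int)) (columns : List String) (out : List (List (String × Int))) : Prop := out = mount_response_dict_alt rows columns
instance (rows : List (List Int)) (columns : List String) (out : List (List (String × Int))) : Decidable (Spec_mount_response_dict rows columns out) := by unfold Spec_mount_response_dict; infer_instance

-- ===== CLAIM (what is proved, stated in full; the proofs are below) =====
def Claim_equal_mount_response_dict : Prop := ∀ (rows : List (List Int)) (columns : List String), Dom_mount_response_dict rows columns → Pre_mount_response_dict rows columns → Spec_mount_response_dict rows columns (mount_response_dict rows columns)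

-- ===== LEMMAS AND PROOFS =====

-- loop interchange: B's column-outer sweep equals a per-row fold over the columns
lemma swap_loops (ps : List (Int × String)) (ds : List (PySem.Dict String Int))
    (rows : List (List Int)) (h : ds.length = rows.length) :
    ps.foldl
      (fun (result : List (PySem.Dict String Int)) p =>
        (result.zip rows).map (fun dr => dr.1.insert p.2 (PySem.List.pyGetD dr.2 p.1 0)))
      ds
    = (ds.zip rows).map (fun dr =>
        ps.foldl (fun (d : PySem.Dict String Int) p =>
          d.insert p.2 (PySem.List.pyGetD dr.2 p.1 0)) dr.1) := by
  induction ps generalizing ds with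
  | nil =>
    simp only [List.foldl_nil]
    exact (List.map_fst_zip (le_of_eq h)).symm
  | cons p ps ih =>
    simp only [List.foldl_cons]
    set ds' := (ds.zip rows).map (fun dr => dr.1.insert p.2 (PySem.List.pyGetD dr.2 p.1 0)) with hds'
    have hlen : ds'.length = rows.length := by simp [hds', h]
    rw [ih ds' hlen]
    apply List.ext_getElem
    · simp [hlen, h]
    · intro i h1 h2
      simp_all [List.getElem_zip]

-- A's outer foldl with appends is a map
lemma foldl_append_map (rows : List (List Int)) (g : List Int → List (String × Int))
    (acc : List (List (String × Int))) :
    rows.foldl (fun data row => data ++ [g row]) acc = acc ++ rows.map g := by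
  induction rows generalizing acc with
  | nil => simp
  | cons r rest ih => simp [ih]

-- ===== VERDICT (by name: the statement is the Claim_ definition above) =====
theorem mount_response_dict_spec : Claim_equal_mount_response_dict := by
  intro rows columns hd hp
  clear hd hp
  show mount_response_dict rows columns = mount_response_dict_alt rows columns
  rw [mount_response_dict, mount_response_dict_alt, foldl_append_map,
      swap_loops _ _ _ (by simp), List.map_map, List.nil_append]
  induction rows with
  | nil => rfl
  | cons r rest ih =>
    simp only [List.map_cons, List.zip_cons_cons]
    rw [ih]; rfl
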